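-- pv_equiv track=rewrite | github.com/n-matsuzaka/Logic | pro_logic.py | decompose_formula
-- ===== SOURCE A (Python) =====
-- def decompose_formula(formula):
-- 	tf_symbol = ""
-- 	subformulas = []
-- 	if is_atomic(formula):
-- 		subformulas.append(formula)
-- 	for i in range(0, len(formula)):
-- 		if is_tf_symbol(formula[i]) and get_depth(formula[0:i]) == 1:
-- 			tf_symbol = formula[i]
-- 			if tf_symbol != "N":
-- 				subformulas.append(formula[1:i])
-- 			subformulas.append(formula[i+1:len(formula)-1])
-- 	return tf_symbol, subformulas
--
-- def get_depth(ini_segment):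
-- 	return ini_segment.count("(") - ini_segment.count(")")
--
-- def is_atomic(formula):
-- 	if len(formula) != 1:
-- 		return False
-- 	return formula.islower()
--
-- def is_tf_symbol(symbol):
-- 	return symbol in ["C","N","A","O","T","E"]
-- ===== SOURCE B (Python) =====
-- def decompose_formula(formula):
--     tf_symbol = ""
--     subformulas = []
--     if len(formula) == 1 and formula.islower():
--         subformulas.append(formula)
--     depth = 0
--     for i, ch in enumerate(formula):
--         if depth == 1 and ch in "CNAOTE":
--             tf_symbol = ch
--             if ch != "N":
--                 subformulas.append(formula[1:i])
--             subformulas.append(formula[i+1:len(formula)-1])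
--         if ch == "(":
--             depth += 1
--         elif ch == ")":
--             depth -= 1
--     return tf_symbol, subformulas
-- ===== Notes on version B (the rewrite author's own statement) =====
-- stated objective: faster
-- what changed: B maintains a running parenthesis depth in a single pass instead of recounting the parentheses of every prefix at each index, removing the inner scan.
import Mathlib
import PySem

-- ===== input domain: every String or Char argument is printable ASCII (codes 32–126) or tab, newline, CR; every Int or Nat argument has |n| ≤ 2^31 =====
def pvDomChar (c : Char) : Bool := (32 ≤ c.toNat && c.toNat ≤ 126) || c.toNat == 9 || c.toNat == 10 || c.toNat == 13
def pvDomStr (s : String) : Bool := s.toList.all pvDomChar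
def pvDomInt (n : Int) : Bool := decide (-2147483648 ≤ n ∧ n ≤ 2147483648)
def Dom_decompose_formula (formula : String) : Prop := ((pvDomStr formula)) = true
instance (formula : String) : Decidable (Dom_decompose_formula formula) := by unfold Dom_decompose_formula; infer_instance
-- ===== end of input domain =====

-- B replaces A's per-index prefix recount of parentheses (get_depth on formula[0:i]) by a
-- running depth counter maintained in one pass (objective: faster, asymptotic).

-- ===== PORT A =====
-- str.islower() on a length-1 string: exact on the printable-ASCII domain (true iff the char is a-z)
def pvIsLowerChar (c : Char) : Bool := 'a' ≤ c && c ≤ 'z'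

def pv_get_depth (cs : List Char) : Int := (cs.count '(' : Int) - (cs.count ')' : Int)

def pv_is_atomic (cs : List Char) : Bool :=
  if cs.length ≠ 1 then false else cs.all pvIsLowerChar

def pv_is_tf_symbol (c : Char) : Bool := c ∈ ['C','N','A','O','T','E']

def pvStepA (cs : List Char) (st : List Char × List (List Char)) (i : Int) :
    List Char × List (List Char) :=
  if pv_is_tf_symbol (PySem.List.pyGetD cs i ' ') &&
      (pv_get_depth (PySem.List.slice cs (some 0) (some i)) == 1) then
    let t : List Char := [PySem.List.pyGetD cs i ' ']
    let subs := if t ≠ ['N'] then st.2 ++ [PySem.List.slice cs (some 1) (some i)] else st.2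
    (t, subs ++ [PySem.List.slice cs (some (i + 1)) (some ((cs.length : Int) - 1))])
  else st

def decompose_formula (formula : String) : String × List String :=
  let cs := formula.toList
  let subformulas : List (List Char) := if pv_is_atomic cs then [cs] else []
  let res := (PySem.List.pyRange 0 (cs.length : Int) 1).foldl (pvStepA cs) ([], subformulas)
  (String.ofList res.1, res.2.map String.ofList)

-- ===== PORT B =====
def pvStepB (cs : List Char) (st : (List Char × List (List Char)) × Int) (p : Int × Char) :
    (List Char × List (List Char)) × Int :=
  let i := p.1
  let ch := p.2
  let st' :=
    if st.2 == 1 && (ch ∈ ['C','N','A','O','T','E']) then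
      let subs := if ch ≠ 'N' then st.1.2 ++ [PySem.List.slice cs (some 1) (some i)] else st.1.2
      ([ch], subs ++ [PySem.List.slice cs (some (i + 1)) (some ((cs.length : Int) - 1))])
    else st.1
  let d := if ch = '(' then st.2 + 1 else if ch = ')' then st.2 - 1 else st.2
  (st', d)

def decompose_formula_alt (formula : String) : String × List String :=
  let cs := formula.toList
  let subformulas : List (List Char) :=
    if cs.length = 1 && cs.all pvIsLowerChar then [cs] else []
  let res := (PySem.List.enumerate cs 0).foldl (pvStepB cs) (([], subformulas), 0)
  (String.ofList res.1.1, res.1.2.map String.ofList)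

-- ===== PRECONDITION & SPEC =====
def Spec_decompose_formula (formula : String) (out : String × List String) : Prop := out = decompose_formula_alt formula
instance (formula : String) (out : String × List String) : Decidable (Spec_decompose_formula formula out) := by unfold Spec_decompose_formula; infer_instance

-- ===== CLAIM (what is proved, stated in full; the proofs are below) =====
def Claim_equal_decompose_formula : Prop := ∀ (formula : String), Dom_decompose_formula formula → Spec_decompose_formula formula (decompose_formula formula)

-- ===== LEMMAS AND PROOFS =====

-- A's slice formula[0:i] is the i-th prefix
theorem pv_slice_take (cs : List Char) (k : Nat) :
    PySem.List.slice cs (some 0) (some (k : Int)) = cs.take k := by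
  rw [PySem.List.slice_toNat cs (by omega) (by omega)]; simp

-- the running-depth update of B matches A's recount on the next prefix
theorem pv_depth_succ (cs : List Char) (k : Nat) (hk : k < cs.length) :
    pv_get_depth (cs.take (k + 1)) =
      (if cs[k] = '(' then pv_get_depth (cs.take k) + 1
       else if cs[k] = ')' then pv_get_depth (cs.take k) - 1
       else pv_get_depth (cs.take k)) := by
  have h := List.take_succ_eq_append_getElem hk
  by_cases h1 : cs[k] = '('
  · rw [if_pos h1, h, h1]
    simp [pv_get_depth, List.count_append]
    ring
  · by_cases h2 : cs[k] = ')'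
    · rw [if_neg h1, if_pos h2, h, h2]
      simp [pv_get_depth, List.count_append]
      ring
    · rw [if_neg h1, if_neg h2]
      have h1' : (cs[k] == '(') = false := by simp [h1]
      have h2' : (cs[k] == ')') = false := by simp [h2]
      simp only [pv_get_depth, h, List.count_append, List.count_cons, List.count_nil, h1', h2']
      push_cast; ring

-- one loop iteration of B (with the invariant depth) equals one iteration of A
theorem pv_step_eq (cs : List Char) (st : List Char × List (List Char)) (k : Nat)
    (hk : k < cs.length) :
    pvStepB cs (st, pv_get_depth (cs.take k)) ((k : Int), cs[k]) =
      (pvStepA cs st (k : Int), pv_get_depth (cs.take (k + 1))) := by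
  have hget : PySem.List.pyGetD cs (k : Int) ' ' = cs[k] := by
    simp [PySem.List.pyGetD_natCast, hk]
  have hd := pv_depth_succ cs k hk
  simp only [pvStepB, pvStepA, hget, pv_slice_take, pv_is_tf_symbol, Prod.mk.injEq]
  constructor
  · rcases st with ⟨tf, subs⟩
    by_cases hc : cs[k] ∈ ['C','N','A','O','T','E'] <;>
      by_cases hdep : pv_get_depth (cs.take k) = 1 <;>
        simp [hc, hdep]
  · omega

-- the tail of B's loop from index k equals the tail of A's loop from index k
theorem pv_aux (cs : List Char) (m : Nat) :
    ∀ (k : Nat) (st : List Char × List (List Char)), k ≤ cs.length → cs.length - k = m →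
      ((PySem.List.enumerate (cs.drop k) (k : Int)).foldl (pvStepB cs)
          (st, pv_get_depth (cs.take k))).1
        = (PySem.List.pyRange (k : Int) (cs.length : Int) 1).foldl (pvStepA cs) st := by
  induction m with
  | zero =>
    intro k st hk hm
    have hk' : k = cs.length := by omega
    subst hk'
    simp [PySem.List.enumerate_nil, PySem.List.pyRange_one_eq_nil le_rfl]
  | succ m ih =>
    intro k st hk hm
    have hklt : k < cs.length := by omega
    rw [List.drop_eq_getElem_cons hklt, PySem.List.enumerate_cons,
      PySem.List.pyRange_one_cons (by exact_mod_cast hklt)]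
    simp only [List.foldl_cons]
    rw [pv_step_eq cs st k hklt]
    have hcast : (k : Int) + 1 = ((k + 1 : Nat) : Int) := by push_cast; ring
    rw [hcast]
    exact ih (k + 1) _ (by omega) (by omega)

theorem pv_main (formula : String) : decompose_formula formula = decompose_formula_alt formula := by
  have hinit : (if pv_is_atomic formula.toList then [formula.toList] else []) =
      (if formula.toList.length = 1 && formula.toList.all pvIsLowerChar
       then [formula.toList] else []) := by
    by_cases h : formula.toList.length = 1 <;> simp [pv_is_atomic, h]
  have h0 := pv_aux formula.toList formula.toList.length 0
    ([], if pv_is_atomic formula.toList then [formula.toList] else []) (by omega) (by omega)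
  simp only [List.drop_zero, List.take_zero, Int.natCast_zero] at h0
  have hd0 : pv_get_depth ([] : List Char) = 0 := by simp [pv_get_depth]
  rw [hd0] at h0
  simp only [decompose_formula, decompose_formula_alt]
  rw [← hinit, ← h0]

-- ===== VERDICT (by name: the statement is the Claim_ definition above) =====
theorem decompose_formula_spec : Claim_equal_decompose_formula := by
  intro formula _
  exact pv_main formula
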